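-- pv_equiv track=rewrite | github.com/emataei/pr-companion | .code-analysis/scripts/semantic_commit_analyzer.py | _categorize_intents_fallback
-- ===== SOURCE A (Python) =====
-- def _categorize_intents_fallback(commits_by_intent):
--     """Categorize intents for fallback visualization."""
--     enhanced_categories = {}
--
--     category_mapping = {
--         'feature_dev': ['feature', 'feat', 'add', 'implement'],
--         'bug_fixes': ['fix', 'bug', 'hotfix', 'patch'],
--         'testing': ['test', 'spec', 'coverage'],
--         'infrastructure': ['infra', 'deploy', 'config', 'setup', 'workflow', 'ci', 'cd'],
--         'documentation': ['docs', 'doc', 'readme', 'comment']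
--     }
--
--     category_names = {
--         'feature_dev': 'Feature Dev',
--         'bug_fixes': 'Bug Fixes',
--         'testing': 'Testing',
--         'infrastructure': 'Infrastructure',
--         'documentation': 'Documentation'
--     }
--
--     for intent, commits in commits_by_intent.items():
--         categorized = False
--         for category_key, keywords in category_mapping.items():
--             if intent.lower() in keywords:
--                 category_name = category_names[category_key]
--                 enhanced_categories[category_name] = enhanced_categories.get(category_name, 0) + len(commits)
--                 categorized = True
--                 break
--
--         if not categorized:
--             enhanced_categories['Code Quality'] = enhanced_categories.get('Code Quality', 0) + len(commits)
--
--     return enhanced_categories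
-- ===== SOURCE B (Python) =====
-- def _categorize_intents_fallback(commits_by_intent):
--     """Categorize intents for fallback visualization.
--
--     Label-then-group-by version: first label every intent with its display
--     category in one pass (via an inverted keyword index), then build the
--     result as a comprehension over the distinct labels in first-occurrence
--     order, summing each label's counts."""
--     category_mapping = {
--         'feature_dev': ['feature', 'feat', 'add', 'implement'],
--         'bug_fixes': ['fix', 'bug', 'hotfix', 'patch'],
--         'testing': ['test', 'spec', 'coverage'],
--         'infrastructure': ['infra', 'deploy', 'config', 'setup', 'workflow', 'ci', 'cd'],
--         'documentation': ['docs', 'doc', 'readme', 'comment']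
--     }
--     category_names = {
--         'feature_dev': 'Feature Dev',
--         'bug_fixes': 'Bug Fixes',
--         'testing': 'Testing',
--         'infrastructure': 'Infrastructure',
--         'documentation': 'Documentation'
--     }
--     keyword_to_name = {kw: category_names[key]
--                        for key, kws in category_mapping.items() for kw in kws}
--     labels = [(keyword_to_name.get(intent.lower(), 'Code Quality'), len(commits))
--               for intent, commits in commits_by_intent.items()]
--     return {name: sum(c for n, c in labels if n == name)
--             for name in dict.fromkeys(n for n, _ in labels)}
-- ===== Notes on version B (the rewrite author's own statement) =====
-- stated objective: alternative
-- what changed: Replaces A's single pass that scans the five keyword lists per intent and incrementally updates an accumulator dict (flag + break) by a label-then-group-by pipeline: one pass labels each intent with its display category via an inverted keyword index, then the result is built per distinct label in first-occurrence order by summing that label's counts.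
import Mathlib
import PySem

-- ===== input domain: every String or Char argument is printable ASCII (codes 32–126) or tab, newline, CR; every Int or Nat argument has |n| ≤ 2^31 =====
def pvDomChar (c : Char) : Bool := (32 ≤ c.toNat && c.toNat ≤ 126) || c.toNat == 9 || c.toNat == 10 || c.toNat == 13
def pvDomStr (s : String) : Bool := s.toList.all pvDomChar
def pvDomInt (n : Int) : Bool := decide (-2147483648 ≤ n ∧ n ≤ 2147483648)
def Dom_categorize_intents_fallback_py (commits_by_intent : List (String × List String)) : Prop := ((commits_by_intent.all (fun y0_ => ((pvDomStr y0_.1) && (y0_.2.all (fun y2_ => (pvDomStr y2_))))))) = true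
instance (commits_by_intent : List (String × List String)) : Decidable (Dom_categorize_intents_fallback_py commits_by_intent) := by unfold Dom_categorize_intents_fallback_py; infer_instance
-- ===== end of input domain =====

-- B replaces A's incremental accumulator-dict pass (inner keyword scan, flag + break)
-- by a label-then-group-by pipeline: label every intent with its display category via
-- an inverted keyword index, then sum the counts per distinct label in first-occurrence
-- order; objective: alternative (same cost, different shape).

-- first-match lookup in a literal dict (dict[k] / dict.get(k)); exact for these
-- literal dicts, whose keys are distinct.
def pvLookup (k : String) : List (String × String) → Option String
  | [] => none
  | (a, b) :: rest => if a == k then some b else pvLookup k rest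

-- ===== PORT A =====
def pvCatMapping : List (String × List String) :=
  [("feature_dev", ["feature", "feat", "add", "implement"]),
   ("bug_fixes", ["fix", "bug", "hotfix", "patch"]),
   ("testing", ["test", "spec", "coverage"]),
   ("infrastructure", ["infra", "deploy", "config", "setup", "workflow", "ci", "cd"]),
   ("documentation", ["docs", "doc", "readme", "comment"])]

def pvCatNames : List (String × String) :=
  [("feature_dev", "Feature Dev"), ("bug_fixes", "Bug Fixes"), ("testing", "Testing"),
   ("infrastructure", "Infrastructure"), ("documentation", "Documentation")]

-- the inner 'for category_key, keywords … break' loop: returns the matched display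
-- name, none = 'not categorized'.  (category_names[category_key] never misses a key
-- here, so getD's default "" is unreachable.)
def pvFindA (low : String) : List (String × List String) → Option String
  | [] => none
  | (k, kws) :: rest => if low ∈ kws then some ((pvLookup k pvCatNames).getD "") else pvFindA low rest

def categorize_intents_fallback_py (commits_by_intent : List (String × List String)) : List (String × Int) :=
  (commits_by_intent.foldl
    (fun d p =>
      match pvFindA (PySem.Str.lower p.1) pvCatMapping with
      | some name => d.insert name (d.getD name 0 + (p.2.length : Int))
      | none => d.insert "Code Quality" (d.getD "Code Quality" 0 + (p.2.length : Int)))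
    PySem.Dict.empty).items

-- ===== PORT B =====
-- the inverted dict comprehension {kw: category_names[key] for key, kws in …  for kw in kws};
-- the keywords are pairwise distinct, so first-match lookup in this flatten is exact.
def pvKw2Name : List (String × String) :=
  pvCatMapping.flatMap (fun p => p.2.map (fun kw => (kw, (pvLookup p.1 pvCatNames).getD "")))

def categorize_intents_fallback_py_alt (commits_by_intent : List (String × List String)) : List (String × Int) :=
  let labels := commits_by_intent.map
    (fun p => ((pvLookup (PySem.Str.lower p.1) pvKw2Name).getD "Code Quality", (p.2.length : Int)))
  (PySem.List.dedup (labels.map (·.1))).map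
    (fun n => (n, ((labels.filter (fun q => q.1 == n)).map (·.2)).sum))

-- ===== PRECONDITION & SPEC =====
def Spec_categorize_intents_fallback_py (commits_by_intent : List (String × List String)) (out : List (String × Int)) : Prop := out = categorize_intents_fallback_py_alt commits_by_intent
instance (commits_by_intent : List (String × List String)) (out : List (String × Int)) : Decidable (Spec_categorize_intents_fallback_py commits_by_intent out) := by unfold Spec_categorize_intents_fallback_py; infer_instance

-- ===== CLAIM (what is proved, stated in full; the proofs are below) =====
def Claim_equal_categorize_intents_fallback_py : Prop := ∀ (commits_by_intent : List (String × List String)), Dom_categorize_intents_fallback_py commits_by_intent → Spec_categorize_intents_fallback_py commits_by_intent (categorize_intents_fallback_py commits_by_intent)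

-- ===== LEMMAS AND PROOFS =====

-- the label A's inner scan assigns to an intent (and B's lookup, by pvFind_eq_lookup)
def pvKey (p : String × List String) : String :=
  (pvLookup (PySem.Str.lower p.1) pvKw2Name).getD "Code Quality"

-- lookup in a block of keys all mapping to the same name = membership in the block
theorem pvLookup_block (s name : String) (kws : List String) (rest : List (String × String)) :
    pvLookup s (kws.map (fun kw => (kw, name)) ++ rest) =
      if s ∈ kws then some name else pvLookup s rest := by
  induction kws with
  | nil => simp
  | cons k tl ih =>
    by_cases hk : k = s
    · simp [pvLookup, hk]
    · have hk' : ¬ s = k := fun h => hk h.symm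
      simp [pvLookup, hk, hk', ih]

-- A's scan over any mapping list = lookup in its flattened inverted index
theorem pvFind_flat (s : String) (M : List (String × List String)) :
    (match pvFindA s M with
     | some name => name
     | none => "Code Quality") =
    (pvLookup s (M.flatMap (fun p =>
        p.2.map (fun kw => (kw, (pvLookup p.1 pvCatNames).getD ""))))).getD "Code Quality" := by
  induction M with
  | nil => simp [pvFindA, pvLookup]
  | cons hd tl ih =>
    obtain ⟨k, kws⟩ := hd
    simp only [List.flatMap_cons, pvLookup_block, pvFindA]
    by_cases hm : s ∈ kws
    · simp [hm]
    · simp [hm, ih]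

-- A's loop body written with the label function pvKey
theorem pvStep_eq :
    (fun (d : PySem.Dict String Int) (p : String × List String) =>
      match pvFindA (PySem.Str.lower p.1) pvCatMapping with
      | some name => d.insert name (d.getD name 0 + (p.2.length : Int))
      | none => d.insert "Code Quality" (d.getD "Code Quality" 0 + (p.2.length : Int))) =
    (fun (d : PySem.Dict String Int) (p : String × List String) =>
      d.insert (pvKey p) (d.getD (pvKey p) 0 + (p.2.length : Int))) := by
  funext d p
  have h := pvFind_flat (PySem.Str.lower p.1) pvCatMapping
  rw [show pvCatMapping.flatMap (fun q =>
        q.2.map (fun kw => (kw, (pvLookup q.1 pvCatNames).getD ""))) = pvKw2Name from rfl] at h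
  cases hf : pvFindA (PySem.Str.lower p.1) pvCatMapping with
  | none => rw [hf] at h; simp only [pvKey, ← h]
  | some name => rw [hf] at h; simp only [pvKey, ← h]

-- the accumulated value at key n after the fold = initial value + sum of the
-- contributions of the entries labelled n
theorem pvGetD_fold {α : Type} (key : α → String) (val : α → Int)
    (l : List α) (d : PySem.Dict String Int) (n : String) :
    (l.foldl (fun d p => d.insert (key p) (d.getD (key p) 0 + val p)) d).getD n 0
      = d.getD n 0 + ((l.filter (fun p => key p == n)).map val).sum := by
  induction l generalizing d with
  | nil => simp
  | cons hd tl ih =>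
    simp only [List.foldl_cons, ih, List.filter_cons]
    by_cases hk : key hd = n
    · simp [hk]
      ring
    · have hk2 : n ≠ key hd := fun h => hk h.symm
      simp [hk, hk2, PySem.Dict.getD_insert]

-- ===== VERDICT (by name: the statement is the Claim_ definition above) =====
theorem categorize_intents_fallback_py_spec : Claim_equal_categorize_intents_fallback_py := by
  intro xs _
  unfold Spec_categorize_intents_fallback_py categorize_intents_fallback_py categorize_intents_fallback_py_alt
  rw [pvStep_eq]
  have hnod : (xs.foldl (fun d p => d.insert (pvKey p) (d.getD (pvKey p) 0 + (p.2.length : Int)))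
      PySem.Dict.empty).keys.Nodup := by
    exact PySem.Dict.nodup_keys_foldl_insert_key xs pvKey _ _ PySem.Dict.nodup_keys_empty
  rw [PySem.Dict.items_eq_map_keys _ hnod 0]
  rw [PySem.Dict.keys_foldl_insert_key]
  simp only [PySem.Dict.keys_empty, PySem.Set.update_nil_left]
  simp only [List.map_map, List.filter_map, PySem.List.dedup_eq_ofList]
  apply List.map_congr_left
  intro n hn
  rw [pvGetD_fold pvKey (fun p => (p.2.length : Int)) xs PySem.Dict.empty n]
  simp [Function.comp_def, pvKey]
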